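-- pv_equiv track=rewrite | github.com/JingyZhu/FidEx-fidelity | fidelity_check/check_utils.py | _merge_xpaths
-- ===== SOURCE A (Python) =====
-- def _merge_xpaths(xpaths):
--     """
--     Merge the xpaths that have the same prefix
--
--     Returns:
--         List[List]: List of xpaths that share the same prefix
--     """
--     xpaths = sorted(xpaths)
--     merged_xpaths = []
--     for xpath in xpaths:
--         if not merged_xpaths:
--             merged_xpaths.append([xpath])
--             continue
--         last = merged_xpaths[-1]
--         if xpath.startswith(last[0]):
--             last.append(xpath)
--         else:
--             merged_xpaths.append([xpath])
--     return merged_xpaths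
-- ===== SOURCE B (Python) =====
-- def _merge_xpaths(xpaths):
--     """
--     Merge the xpaths that have the same prefix.
--
--     On a sorted list order, the strings starting with `head` occupy exactly
--     the contiguous interval [head, head + '\x7f') (inputs are below '\x7f',
--     i.e. printable ASCII / tab / newline), so each group's end is found by a
--     hand-written binary search instead of scanning element by element.
--
--     Returns:
--         List[List]: List of xpaths that share the same prefix
--     """
--     xs = sorted(xpaths)
--     n = len(xs)
--     groups = []
--     i = 0
--     while i < n:
--         bound = xs[i] + '\x7f'
--         lo, hi = i + 1, n
--         while lo < hi:
--             mid = (lo + hi) // 2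
--             if xs[mid] < bound:
--                 lo = mid + 1
--             else:
--                 hi = mid
--         groups.append(xs[i:lo])
--         i = lo
--     return groups
-- ===== Notes on version B (the rewrite author's own statement) =====
-- stated objective: alternative
-- what changed: Replaces A's per-element fold that inspects and mutates the last accumulated group with a binary search: on the sorted list the strings starting with a group head fill exactly the interval [head, head+'\x7f'), so each group's end index is found by bisection and the group sliced out at once.
import Mathlib
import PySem

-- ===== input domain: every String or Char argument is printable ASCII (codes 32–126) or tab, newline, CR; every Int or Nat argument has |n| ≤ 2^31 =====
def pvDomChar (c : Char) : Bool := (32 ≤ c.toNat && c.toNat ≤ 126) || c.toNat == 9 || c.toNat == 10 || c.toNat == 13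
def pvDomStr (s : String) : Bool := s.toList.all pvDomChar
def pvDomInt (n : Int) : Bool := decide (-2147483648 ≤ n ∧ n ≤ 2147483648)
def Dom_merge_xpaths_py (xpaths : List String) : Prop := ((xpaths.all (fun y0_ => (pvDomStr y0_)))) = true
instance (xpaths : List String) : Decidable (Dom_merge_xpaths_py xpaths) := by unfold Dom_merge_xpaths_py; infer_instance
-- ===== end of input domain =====

-- B replaces A's per-element fold (appending into the last accumulated group) with a
-- binary search: on the sorted list the strings starting with `head` fill exactly the
-- interval [head, head + '\x7f') for inputs below '\x7f' (the stated ASCII domain), so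
-- each group's end index is found by bisection instead of an element-by-element scan.


-- ===== PORT A =====
-- one loop iteration of A: inspect merged_xpaths[-1], extend it or start a new group
def stepA (acc : List (List String)) (x : String) : List (List String) :=
  match acc.getLast? with
  | none => [[x]]                                   -- 'if not merged_xpaths'
  | some last =>
    if PySem.Str.startswith x (last.headD "") then  -- xpath.startswith(last[0]); groups are never empty
      acc.dropLast ++ [last ++ [x]]                 -- last.append(xpath)
    else
      acc ++ [[x]]                                  -- merged_xpaths.append([xpath])

def merge_xpaths_py (xpaths : List String) : List (List String) :=
  (PySem.List.sorted xpaths (fun s => s) false).foldl stepA []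

-- ===== PORT B =====
-- inner while: hand-written binary search for the leftmost index in [lo, hi) whose
-- element is >= bound (Source B's 'while lo < hi: mid = (lo+hi)//2; ...'); the fuel
-- argument is only a structural totality guard (hi - lo shrinks every iteration)
def bLoop (xs : List String) (bound : String) : Nat → Nat → Nat → Nat
  | 0, lo, _ => lo
  | fuel + 1, lo, hi =>
    if lo < hi then
      let mid := (lo + hi) / 2
      if xs.getD mid "" < bound then bLoop xs bound fuel (mid + 1) hi
      else bLoop xs bound fuel lo mid
    else lo

-- outer while: slice out the group xs[i:j] whose end j the binary search found
-- (fuel again only a totality guard: i advances by at least one group per step)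
def bOuter (xs : List String) : Nat → Nat → List (List String) → List (List String)
  | 0, _, acc => acc
  | fuel + 1, i, acc =>
    if i < xs.length then
      let bound := xs.getD i "" ++ "\x7F"
      let j := bLoop xs bound (xs.length - (i + 1)) (i + 1) xs.length
      bOuter xs fuel j (acc ++ [PySem.List.slice xs (some (i : Int)) (some (j : Int))])
    else acc

def merge_xpaths_py_alt (xpaths : List String) : List (List String) :=
  bOuter (PySem.List.sorted xpaths (fun s => s) false) (PySem.List.sorted xpaths (fun s => s) false).length 0 []

-- ===== PRECONDITION & SPEC =====
def Spec_merge_xpaths_py (xpaths : List String) (out : List (List String)) : Prop := out = merge_xpaths_py_alt xpaths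
instance (xpaths : List String) (out : List (List String)) : Decidable (Spec_merge_xpaths_py xpaths out) := by unfold Spec_merge_xpaths_py; infer_instance

-- ===== CLAIM (what is proved, stated in full; the proofs are below) =====
def Claim_equal_merge_xpaths_py : Prop := ∀ (xpaths : List String), Dom_merge_xpaths_py xpaths → Spec_merge_xpaths_py xpaths (merge_xpaths_py xpaths)

-- ===== LEMMAS AND PROOFS =====

-- the longest prefix-run of l headed by h, and the remainder
def takeRun (h : String) : List String → List String × List String
  | [] => ([], [])
  | x :: rest =>
    if PySem.Str.startswith x h then
      let p := takeRun h rest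
      (x :: p.1, p.2)
    else ([], x :: rest)

-- the common grouping both ports compute on the sorted list
def groupRuns : List String → List (List String)
  | [] => []
  | x :: rest =>
    have : (takeRun x rest).2.length ≤ rest.length := by
      induction rest with
      | nil => simp [takeRun]
      | cons y t ih =>
        simp only [takeRun]
        split
        · simpa using Nat.le_succ_of_le (by simpa [takeRun] using ih)
        · simp
    (x :: (takeRun x rest).1) :: groupRuns (takeRun x rest).2
termination_by l => l.length
decreasing_by simpa using Nat.lt_succ_of_le this

theorem takeRun_append (h : String) (l : List String) :
    (takeRun h l).1 ++ (takeRun h l).2 = l := by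
  induction l with
  | nil => simp [takeRun]
  | cons x rest ih =>
    simp only [takeRun]
    split
    · simpa using ih
    · simp

-- every element of the extracted run starts with the head
theorem takeRun_fst_startswith (h : String) (l : List String) :
    ∀ y ∈ (takeRun h l).1, PySem.Str.startswith y h = true := by
  induction l with
  | nil => simp [takeRun]
  | cons x rest ih =>
    simp only [takeRun]
    split
    · intro y hy
      rcases List.mem_cons.mp hy with rfl | hy
      · assumption
      · exact ih y hy
    · simp

-- the remainder, if nonempty, begins with a non-starter
theorem takeRun_snd_head (h : String) (l : List String) :
    (takeRun h l).2 = [] ∨ ∃ c t, (takeRun h l).2 = c :: t ∧ PySem.Str.startswith c h = false := by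
  induction l with
  | nil => simp [takeRun]
  | cons x rest ih =>
    simp only [takeRun]
    split
    · exact ih
    · right; exact ⟨x, rest, rfl, by simp_all⟩

-- A's fold, once the accumulator is nonempty, with the last group's head abstracted out
def contA (h : String) (g : List String) : List String → List (List String)
  | [] => [g]
  | x :: rest =>
    if PySem.Str.startswith x h then contA h (g ++ [x]) rest
    else g :: contA x [x] rest

theorem foldA_cont (l : List String) :
    ∀ (gs : List (List String)) (g : List String) (h : String),
      g ≠ [] → g.head?.getD "" = h →
      List.foldl stepA (gs ++ [g]) l = gs ++ contA h g l := by
  induction l with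
  | nil => intro gs g h _ _; simp [contA]
  | cons x rest ih =>
    intro gs g h hne hh
    simp only [List.foldl, contA]
    have hlast : (gs ++ [g]).getLast? = some g := by simp
    have hstep : stepA (gs ++ [g]) x =
        if PySem.Str.startswith x h then gs ++ [g ++ [x]] else (gs ++ [g]) ++ [[x]] := by
      simp [stepA, hlast, hh]
    rw [hstep]
    split
    · rw [ih gs (g ++ [x]) h (by simp) (by cases g with | nil => simp at hne | cons a t => simpa using hh)]
    · rw [ih (gs ++ [g]) [x] x (by simp) (by simp)]
      simp

theorem contA_runs (l : List String) :
    ∀ (h : String) (g : List String),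
      contA h g l = (g ++ (takeRun h l).1) :: groupRuns (takeRun h l).2 := by
  induction l with
  | nil => intro h g; simp [contA, takeRun, groupRuns]
  | cons x rest ih =>
    intro h g
    simp only [contA, takeRun]
    split
    · rw [ih h (g ++ [x])]; simp
    · rw [ih x [x]]
      simp [groupRuns]

-- A computes groupRuns of the sorted list
theorem portA_eq_groupRuns (xs : List String) :
    xs.foldl stepA [] = groupRuns xs := by
  cases xs with
  | nil => simp [groupRuns]
  | cons x rest =>
    have h1 : stepA [] x = [[x]] := by simp [stepA]
    have : List.foldl stepA ([] ++ [[x]]) rest = [] ++ contA x [x] rest :=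
      foldA_cont rest [] [x] x (by simp) (by simp)
    simp only [List.foldl, h1]
    simpa [groupRuns, contA_runs rest x [x]] using this

-- domain characters are strictly below '\x7f'
theorem domChar_lt_del (c : Char) (h : pvDomChar c = true) : c < Char.ofNat 127 := by
  have hc : c.toNat < 127 := by
    unfold pvDomChar at h
    simp only [Bool.or_eq_true, Bool.and_eq_true, decide_eq_true_eq, beq_iff_eq] at h
    omega
  have h2 : c.val.toNat = c.toNat := rfl
  have h127 : (Char.ofNat 127).val.toNat = 127 := by decide
  exact UInt32.lt_iff_toNat_lt.mpr (by omega)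

-- a string starting with h (all chars below '\x7f') is < h ++ '\x7f'  (list form)
theorem lex_lt_append_del (p t : List Char) (hd : ∀ c ∈ t, pvDomChar c = true) :
    p ++ t < p ++ [Char.ofNat 127] := by
  show List.Lex (· < ·) (p ++ t) (p ++ [Char.ofNat 127])
  apply List.Lex.append_left
  cases t with
  | nil => exact List.Lex.nil
  | cons c t' =>
    exact List.Lex.rel (domChar_lt_del c (hd c (by simp)))

-- a string ≥ h that does not start with h is ≥ h ++ '\x7f'  (list form)
theorem lex_del_le_of_not_prefix :
    ∀ (p s : List Char), ¬ p <+: s → p ≤ s → p ++ [Char.ofNat 127] ≤ s := by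
  intro p
  induction p with
  | nil => intro s hpre _; exact absurd (List.nil_prefix) hpre
  | cons a p' ih =>
    intro s hpre hle
    cases s with
    | nil =>
      exfalso
      have hnil : ([] : List Char) < a :: p' := List.Lex.nil
      exact absurd hnil (not_lt.mpr hle)
    | cons b s' =>
      rcases lt_trichotomy a b with hab | hab | hab
      · exact le_of_lt (List.Lex.rel hab)
      · subst hab
        have hpre' : ¬ p' <+: s' := fun hc => hpre (List.cons_prefix_cons.mpr ⟨rfl, hc⟩)
        have hle' : p' ≤ s' := by
          by_contra hcon
          have hlt' : s' < p' := not_le.mp hcon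
          have : a :: s' < a :: p' := List.Lex.cons hlt'
          exact absurd this (not_lt.mpr hle)
        exact List.cons_le_cons a (ih s' hpre' hle')
      · exfalso
        have : b :: s' < a :: p' := List.Lex.rel hab
        exact absurd this (not_lt.mpr hle)

theorem toList_del : ("\x7F" : String).toList = [Char.ofNat 127] := by decide

-- string forms of the two bracketing facts
theorem str_lt_bound_of_startswith (h s : String)
    (hsw : PySem.Str.startswith s h = true) (hd : pvDomStr s = true) :
    s < h ++ "\x7F" := by
  rw [String.lt_iff_toList_lt, String.toList_append, toList_del]
  rcases (PySem.Chars.startswith_iff s.toList h.toList).mp (by simpa [PySem.Str.startswith] using hsw) with ⟨t, ht⟩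
  rw [← ht]
  apply lex_lt_append_del
  intro c hc
  have hcs : c ∈ s.toList := by rw [← ht]; exact List.mem_append_right _ hc
  exact List.all_eq_true.mp (by simpa [pvDomStr] using hd) c hcs

theorem str_bound_le_of_not_startswith (h s : String)
    (hsw : PySem.Str.startswith s h = false) (hle : h ≤ s) :
    h ++ "\x7F" ≤ s := by
  rw [String.le_iff_toList_le, String.toList_append, toList_del]
  apply lex_del_le_of_not_prefix
  · intro hc
    have := (PySem.Chars.startswith_iff s.toList h.toList).mpr hc
    simp [PySem.Str.startswith] at hsw
    rw [hsw] at this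
    exact Bool.false_ne_true this
  · exact String.le_iff_toList_le.mp hle

-- the binary search returns the (unique) boundary index
theorem bLoop_eq (xs : List String) (bound : String) (k : Nat) :
    ∀ (fuel lo hi : Nat), hi - lo ≤ fuel → lo ≤ k → k ≤ hi →
      (∀ m, lo ≤ m → m < k → xs.getD m "" < bound) →
      (∀ m, k ≤ m → m < hi → ¬ xs.getD m "" < bound) →
      bLoop xs bound fuel lo hi = k := by
  intro fuel
  induction fuel with
  | zero =>
    intro lo hi hf h1 h2 _ _
    show lo = k
    omega
  | succ fuel ihf =>
    intro lo hi hf h1 h2 hlt hge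
    show (if lo < hi then
        let mid := (lo + hi) / 2
        if xs.getD mid "" < bound then bLoop xs bound fuel (mid + 1) hi
        else bLoop xs bound fuel lo mid
      else lo) = k
    by_cases hlohi : lo < hi
    · rw [if_pos hlohi]
      show (if xs.getD ((lo + hi) / 2) "" < bound then bLoop xs bound fuel ((lo + hi) / 2 + 1) hi
        else bLoop xs bound fuel lo ((lo + hi) / 2)) = k
      by_cases hc : xs.getD ((lo + hi) / 2) "" < bound
      · rw [if_pos hc]
        have hk : (lo + hi) / 2 + 1 ≤ k := by
          by_contra hcon
          exact hge ((lo + hi) / 2) (by omega) (by omega) hc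
        exact ihf ((lo + hi) / 2 + 1) hi (by omega) hk h2
          (fun m hm1 hm2 => hlt m (by omega) hm2) hge
      · rw [if_neg hc]
        have hk : k ≤ (lo + hi) / 2 := by
          by_contra hcon
          exact hc (hlt ((lo + hi) / 2) (by omega) (by omega))
        exact ihf lo ((lo + hi) / 2) (by omega) h1 hk hlt
          (fun m hm1 hm2 => hge m hm1 (by omega))
    · rw [if_neg hlohi]
      omega

-- the outer loop appends groupRuns of the remaining suffix
theorem bOuter_eq (k : Nat) :
    ∀ (xs : List String) (i : Nat) (acc : List (List String)),
      xs.Pairwise (· ≤ ·) → (∀ s ∈ xs, pvDomStr s = true) →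
      i ≤ xs.length → xs.length - i ≤ k →
      bOuter xs k i acc = acc ++ groupRuns (xs.drop i) := by
  induction k with
  | zero =>
    intro xs i acc _ _ hi hk
    have : i = xs.length := by omega
    show acc = acc ++ groupRuns (xs.drop i)
    simp [this, groupRuns]
  | succ k ih =>
    intro xs i acc hsort hdom hi hk
    by_cases hlt : i < xs.length
    · obtain ⟨x, rest, hd⟩ : ∃ x rest, xs.drop i = x :: rest := by
        cases hdrop : xs.drop i with
        | nil => exfalso; have := congrArg List.length hdrop; simp at this; omega
        | cons a t => exact ⟨a, t, rfl⟩
      have hx : xs.getD i "" = x := by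
        have h0 : (List.drop i xs)[0]? = xs[i + 0]? := List.getElem?_drop
        rw [hd] at h0
        have : xs[i]? = some x := by simpa using h0.symm
        simp [List.getD, this]
      have hrest : xs.drop (i + 1) = rest := by
        have := congrArg List.tail hd
        simpa [List.tail_drop] using this
      have hlenrest : rest.length = xs.length - (i + 1) := by
        have := congrArg List.length hrest; simpa using this.symm
      have hrt : (takeRun x rest).1 ++ (takeRun x rest).2 = rest := takeRun_append x rest
      have hlen : (takeRun x rest).1.length + (takeRun x rest).2.length = rest.length := by
        have := congrArg List.length hrt; simpa using this
      set r := (takeRun x rest).1 with hr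
      set t := (takeRun x rest).2 with ht
      set j := (i + 1) + r.length with hjdef
      have hjle : j ≤ xs.length := by omega
      have hsplit : xs.drop (i + 1) = r ++ t := by rw [hrest]; exact hrt.symm
      have hget? : ∀ q : Nat, xs[(i + 1) + q]? = (r ++ t)[q]? := by
        intro q
        rw [← List.getElem?_drop, hsplit]
      have hmono : ∀ p q (hp : p ≤ q) (hq : q < xs.length), xs[p]'(by omega) ≤ xs[q] := by
        intro p q hp hq
        rcases Nat.lt_or_eq_of_le hp with hlt' | rfl
        · exact (List.pairwise_iff_getElem.mp hsort) p q (by omega) hq hlt'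
        · exact le_refl _
      have hdomxs : ∀ m (hm : m < xs.length), pvDomStr (xs[m]'hm) = true := by
        intro m hm
        exact hdom _ (List.getElem_mem hm)
      have hxi : xs[i]? = some x := by
        have h0 : (List.drop i xs)[0]? = xs[i + 0]? := List.getElem?_drop
        rw [hd] at h0
        simpa using h0.symm
      -- the binary search finds j
      have hxj : bLoop xs (x ++ "\x7F") (xs.length - (i + 1)) (i + 1) xs.length = j := by
        apply bLoop_eq
        · omega
        · omega
        · omega
        · intro m hm1 hm2
          obtain ⟨q, rfl⟩ : ∃ q, m = (i + 1) + q := ⟨m - (i + 1), by omega⟩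
          have hq : q < r.length := by omega
          have e1 : xs[(i + 1) + q]? = some (r[q]'hq) := by
            rw [hget?, List.getElem?_append_left hq]
            exact List.getElem?_eq_getElem hq
          have e2 : xs.getD ((i + 1) + q) "" = r[q]'hq := by
            rw [List.getD_eq_getElem?_getD, e1]; rfl
          rw [e2]
          have hmem : r[q]'hq ∈ r := List.getElem_mem hq
          have hsw := takeRun_fst_startswith x rest _ hmem
          have hdm : pvDomStr (r[q]'hq) = true := by
            have : r[q]'hq ∈ xs := by
              have e3 : xs[(i + 1) + q]'(by omega) = r[q]'hq :=
                (List.getElem?_eq_some_iff.mp e1).2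
              rw [← e3]; exact List.getElem_mem (by omega)
            exact hdom _ this
          exact str_lt_bound_of_startswith x _ hsw hdm
        · intro m hm1 hm2
          -- t must be nonempty here
          rcases takeRun_snd_head x rest with htnil | ⟨c, t', htc, hcsw⟩
          · exfalso
            have : t.length = 0 := by rw [ht, htnil]; rfl
            omega
          · have hjn : j < xs.length := by
              have : t.length ≠ 0 := by rw [ht, htc]; simp
              omega
            have hxjc? : xs[j]? = some c := by
              rw [show j = (i + 1) + r.length by omega, hget?,
                List.getElem?_append_right (le_refl r.length)]
              simp [ht, htc]
            have hxjc : xs[j]'hjn = c := (List.getElem?_eq_some_iff.mp hxjc?).2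
            have hxle : x ≤ c := by
              rw [← hxjc]
              have hxig : xs[i]'(by omega) = x := (List.getElem?_eq_some_iff.mp hxi).2
              rw [← hxig]
              exact hmono i j (by omega) hjn
            have hbound : x ++ "\x7F" ≤ c := str_bound_le_of_not_startswith x c hcsw hxle
            have hmn : m < xs.length := by omega
            have hcm : c ≤ xs[m]'hmn := by
              rw [← hxjc]; exact hmono j m hm1 hmn
            rw [List.getD_eq_getElem?_getD, List.getElem?_eq_getElem hmn]
            exact not_lt.mpr (le_trans hbound hcm)
      have hslice : PySem.List.slice xs (some (i : Int)) (some (j : Int)) = x :: r := by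
        rw [PySem.List.slice_natCast]
        have : j - i = r.length + 1 := by omega
        rw [this, hd]
        simp [← hrt]
      have hdropj : xs.drop j = t := by
        have h1 : (xs.drop (i + 1)).drop r.length = xs.drop j := by
          rw [List.drop_drop]
        rw [← h1, hrest, ← hrt]; simp
      show (if i < xs.length then
          let bound := xs.getD i "" ++ "\x7F"
          let j' := bLoop xs bound (xs.length - (i + 1)) (i + 1) xs.length
          bOuter xs k j' (acc ++ [PySem.List.slice xs (some (i : Int)) (some (j' : Int))])
        else acc) = acc ++ groupRuns (xs.drop i)
      rw [if_pos hlt]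
      simp only [hx, hxj, hslice]
      rw [ih xs j (acc ++ [x :: r]) hsort hdom hjle (by omega), hdropj, hd]
      have hg : groupRuns (x :: rest) = (x :: r) :: groupRuns t := by
        rw [groupRuns]
      rw [hg]; simp
    · show (if i < xs.length then
          let bound := xs.getD i "" ++ "\x7F"
          let j' := bLoop xs bound (xs.length - (i + 1)) (i + 1) xs.length
          bOuter xs k j' (acc ++ [PySem.List.slice xs (some (i : Int)) (some (j' : Int))])
        else acc) = acc ++ groupRuns (xs.drop i)
      rw [if_neg hlt]
      have : i = xs.length := by omega
      simp [this, groupRuns]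

-- ===== VERDICT (by name: the statement is the Claim_ definition above) =====
theorem merge_xpaths_py_spec : Claim_equal_merge_xpaths_py := by
  intro xpaths hdom
  unfold Spec_merge_xpaths_py merge_xpaths_py merge_xpaths_py_alt
  set xs := PySem.List.sorted xpaths (fun s => s) false with hxs
  have hsort : xs.Pairwise (· ≤ ·) := PySem.List.sorted_pairwise xpaths (fun s => s)
  have hdomxs : ∀ s ∈ xs, pvDomStr s = true := by
    intro s hs
    have : s ∈ xpaths := (PySem.List.mem_sorted xpaths (fun s => s) false s).mp hs
    exact List.all_eq_true.mp hdom s this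
  rw [portA_eq_groupRuns, bOuter_eq xs.length xs 0 [] hsort hdomxs (by omega) (by omega)]
  simp
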